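-- pv_equiv track=rewrite | github.com/MGEternal/Data_structure | group_of_no_1.py | group_of_no_1
-- ===== SOURCE A (Python) =====
-- def group_of_no_1(island_list, point_no):
--     # ตรวจสอบว่า point_no อยู่ในช่วงของรายการ island_list
--     if point_no < 0 or point_no >= len(island_list):
--         return 0  # ถ้า point_no ไม่อยู่ในช่วงของรายการให้คืนค่า 0
--
--     # ตรวจสอบว่าค่าที่ point_no คือ 1
--     if island_list[point_no] != 1:
--         return 0  # ถ้าค่าที่ point_no ไม่ใช่ 1 ให้คืนค่า 0
--
--     # นับจำนวนตัวเลข 1 ที่ติดกัน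
--     count = 1  # เริ่มนับที่ตัวเลขที่ point_no
--
--     # นับตัวเลข 1 ทางด้านซ้ายของ point_no
--     left = point_no - 1
--     while left >= 0 and island_list[left] == 1:
--         count += 1
--         left -= 1
--
--     # นับตัวเลข 1 ทางด้านขวาของ point_no
--     right = point_no + 1
--     while right < len(island_list) and island_list[right] == 1:
--         count += 1
--         right += 1
--
--     return count
-- ===== SOURCE B (Python) =====
-- def group_of_no_1(island_list, point_no):
--     # Single global left-to-right pass: segment the list into runs of 1s,
--     # remembering the length of the run that covers point_no.
--     if point_no < 0 or point_no >= len(island_list):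
--         return 0
--     run_start = 0   # start index of the current (open) run of 1s
--     run_len = 0     # its length so far
--     ans = 0         # length of a closed run covering point_no, if seen
--     for i, v in enumerate(island_list):
--         if v == 1:
--             run_len += 1
--         else:
--             if run_start <= point_no < run_start + run_len:
--                 ans = run_len
--             run_start = i + 1
--             run_len = 0
--     if run_start <= point_no < run_start + run_len:
--         return run_len
--     return ans
-- ===== Notes on version B (the rewrite author's own statement) =====
-- stated objective: alternative
-- what changed: B replaces A's bidirectional local expansion (two while-loops walking left and right from point_no, with an explicit element check at point_no) by one global left-to-right pass that segments the list into runs of consecutive 1s and returns the length of the run whose index span covers point_no (0 if none does).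
import Mathlib
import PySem

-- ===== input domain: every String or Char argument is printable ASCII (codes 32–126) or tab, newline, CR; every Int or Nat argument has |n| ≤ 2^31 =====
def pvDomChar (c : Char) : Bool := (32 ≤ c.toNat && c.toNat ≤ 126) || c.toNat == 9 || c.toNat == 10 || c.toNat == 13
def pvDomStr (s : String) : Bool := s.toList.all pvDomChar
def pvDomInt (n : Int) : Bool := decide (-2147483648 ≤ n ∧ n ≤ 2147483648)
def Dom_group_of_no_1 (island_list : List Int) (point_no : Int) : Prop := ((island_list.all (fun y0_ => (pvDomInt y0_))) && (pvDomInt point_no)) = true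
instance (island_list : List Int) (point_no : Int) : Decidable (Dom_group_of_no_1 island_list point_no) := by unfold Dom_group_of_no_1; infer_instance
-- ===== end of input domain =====

-- B replaces A's bidirectional local expansion around point_no by a single global
-- left-to-right run-segmentation pass; same O(n) cost, alternative algorithm.

-- ===== PORT A =====
-- while left >= 0 and island_list[left] == 1: count += 1; left -= 1
def pvALeft (xs : List Int) (left : Int) (count : Int) : Int :=
  if h : 0 ≤ left ∧ PySem.List.pyGet? xs left = some 1 then
    pvALeft xs (left - 1) (count + 1)
  else count
termination_by (left + 1).toNat
decreasing_by omega

-- while right < len(island_list) and island_list[right] == 1: count += 1; right += 1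
def pvARight (xs : List Int) (right : Int) (count : Int) : Int :=
  if h : right < (xs.length : Int) ∧ PySem.List.pyGet? xs right = some 1 then
    pvARight xs (right + 1) (count + 1)
  else count
termination_by ((xs.length : Int) - right).toNat
decreasing_by omega

def group_of_no_1 (island_list : List Int) (point_no : Int) : Int :=
  if point_no < 0 ∨ (island_list.length : Int) ≤ point_no then 0
  else if ¬ (PySem.List.pyGet? island_list point_no = some 1) then 0
  else pvARight island_list (point_no + 1) (pvALeft island_list (point_no - 1) 1)

-- ===== PORT B =====
-- loop body of B's single pass: state = (run_start, run_len, ans)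
def pvBStep (p : Int) (st : Int × Int × Int) (iv : Int × Int) : Int × Int × Int :=
  match st, iv with
  | (rs, rl, ans), (i, v) =>
    if v = 1 then (rs, rl + 1, ans)
    else if rs ≤ p ∧ p < rs + rl then (i + 1, 0, rl)
    else (i + 1, 0, ans)

def group_of_no_1_alt (island_list : List Int) (point_no : Int) : Int :=
  if point_no < 0 ∨ (island_list.length : Int) ≤ point_no then 0
  else
    let st := (PySem.List.enumerate island_list 0).foldl (pvBStep point_no) (0, 0, 0)
    if st.1 ≤ point_no ∧ point_no < st.1 + st.2.1 then st.2.1 else st.2.2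

-- ===== PRECONDITION & SPEC =====
def Spec_group_of_no_1 (island_list : List Int) (point_no : Int) (out : Int) : Prop := out = group_of_no_1_alt island_list point_no
instance (island_list : List Int) (point_no : Int) (out : Int) : Decidable (Spec_group_of_no_1 island_list point_no out) := by unfold Spec_group_of_no_1; infer_instance

-- ===== CLAIM (what is proved, stated in full; the proofs are below) =====
def Claim_equal_group_of_no_1 : Prop := ∀ (island_list : List Int) (point_no : Int), Dom_group_of_no_1 island_list point_no → Spec_group_of_no_1 island_list point_no (group_of_no_1 island_list point_no)

-- ===== LEMMAS AND PROOFS =====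

-- length of the maximal all-1 suffix of xs.take m
def pvLn (xs : List Int) : Nat → Nat
  | 0 => 0
  | m + 1 => if xs[m]? = some 1 then pvLn xs m + 1 else 0

-- length of the maximal all-1 prefix of xs.drop j
def pvRn (xs : List Int) (j : Nat) : Nat :=
  if h : xs[j]? = some 1 then pvRn xs (j + 1) + 1 else 0
termination_by xs.length - j
decreasing_by
  have : j < xs.length := by
    by_contra hc
    simp [List.getElem?_eq_none (Nat.le_of_not_lt hc)] at h
  omega

theorem pvALeft_eq (xs : List Int) (m : Nat) (c : Int) :
    pvALeft xs ((m : Int) - 1) c = c + pvLn xs m := by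
  induction m generalizing c with
  | zero => rw [pvALeft]; simp [pvLn]
  | succ m ih =>
    have e : ((m + 1 : Nat) : Int) - 1 = (m : Int) := by push_cast; ring
    rw [e, pvALeft]
    by_cases h : xs[m]? = some 1
    · rw [dif_pos ⟨by positivity, by simpa using h⟩, ih, pvLn, if_pos h]
      push_cast; ring
    · rw [dif_neg (by rintro ⟨-, h2⟩; exact h (by simpa using h2)), pvLn, if_neg h]
      simp

theorem pvRn_add_le (xs : List Int) (j : Nat) (hj : j ≤ xs.length) : j + pvRn xs j ≤ xs.length := by
  induction j using pvRn.induct xs with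
  | case1 j h ih =>
    have hj : j < xs.length := by
      by_contra hc
      simp [List.getElem?_eq_none (Nat.le_of_not_lt hc)] at h
    rw [pvRn, dif_pos h]
    have := ih (by omega)
    omega
  | case2 j h =>
    rw [pvRn, dif_neg h]
    omega

theorem pvRn_end_ne (xs : List Int) (j : Nat) : ¬ xs[j + pvRn xs j]? = some 1 := by
  induction j using pvRn.induct xs with
  | case1 j h ih =>
    rw [pvRn, dif_pos h]
    have : j + (pvRn xs (j + 1) + 1) = (j + 1) + pvRn xs (j + 1) := by omega
    rw [this]; exact ih
  | case2 j h => rw [pvRn, dif_neg h]; simpa using h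

theorem pvRn_all_one (xs : List Int) (j i : Nat) (h1 : j ≤ i) (h2 : i < j + pvRn xs j) :
    xs[i]? = some 1 := by
  induction j using pvRn.induct xs with
  | case1 j h ih =>
    rw [pvRn, dif_pos h] at h2
    rcases Nat.eq_or_lt_of_le h1 with rfl | hlt
    · exact h
    · exact ih hlt (by omega)
  | case2 j h => rw [pvRn, dif_neg h] at h2; omega

theorem pvRn_of_all (xs : List Int) (j t : Nat)
    (hall : ∀ i, j ≤ i → i < t → xs[i]? = some 1) (ht : ¬ xs[t]? = some 1) (hjt : j ≤ t) :
    pvRn xs j = t - j := by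
  induction j using pvRn.induct xs with
  | case1 j h ih =>
    rw [pvRn, dif_pos h]
    rcases Nat.eq_or_lt_of_le hjt with rfl | hlt
    · exact absurd h ht
    · rw [ih (fun i hi1 hi2 => hall i (by omega) hi2) (by omega)]
      omega
  | case2 j h =>
    rw [pvRn, dif_neg h]
    rcases Nat.eq_or_lt_of_le hjt with rfl | hlt
    · omega
    · exact absurd (hall j le_rfl hlt) h

theorem pvARight_eq (xs : List Int) (j : Nat) (c : Int) :
    pvARight xs (j : Int) c = c + pvRn xs j := by
  induction j using pvRn.induct xs generalizing c with
  | case1 j h ih =>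
    have hj : j < xs.length := by
      by_contra hc
      simp [List.getElem?_eq_none (Nat.le_of_not_lt hc)] at h
    rw [pvARight]
    rw [dif_pos ⟨by exact_mod_cast hj, by simpa using h⟩]
    have e : (j : Int) + 1 = ((j + 1 : Nat) : Int) := by push_cast; ring
    rw [e, ih]
    conv_rhs => rw [pvRn, dif_pos h]
    push_cast; ring
  | case2 j h =>
    rw [pvARight, pvRn, dif_neg h]
    have : ¬ ((j : Int) < (xs.length : Int) ∧ PySem.List.pyGet? xs (j : Int) = some 1) := by
      rintro ⟨h1, h2⟩
      exact h (by simpa using h2)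
    rw [dif_neg this]
    simp

theorem pvLn_le (xs : List Int) (m : Nat) : pvLn xs m ≤ m := by
  induction m with
  | zero => simp [pvLn]
  | succ m ih =>
    rw [pvLn]
    split_ifs with h
    · omega
    · omega

theorem pvLn_all_one (xs : List Int) (m k : Nat) (h1 : m - pvLn xs m ≤ k) (h2 : k < m) :
    xs[k]? = some 1 := by
  induction m with
  | zero => omega
  | succ m ih =>
    have hle := pvLn_le xs m
    rw [pvLn] at h1
    split_ifs at h1 with h
    · rcases Nat.eq_or_lt_of_le (Nat.lt_succ_iff.mp h2) with rfl | hlt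
      · exact h
      · exact ih (by omega) hlt
    · omega

theorem pvLn_sub (xs : List Int) (m k : Nat) (h1 : m - pvLn xs m ≤ k) (h2 : k ≤ m) :
    pvLn xs k + (m - k) = pvLn xs m := by
  induction m with
  | zero =>
    have hk0 : k = 0 := by omega
    subst hk0
    simp
  | succ m ih =>
    have hle := pvLn_le xs m
    by_cases h : xs[m]? = some 1
    · rw [pvLn, if_pos h] at h1 ⊢
      rcases Nat.eq_or_lt_of_le h2 with rfl | hlt
      · rw [pvLn, if_pos h]; omega
      · have := ih (by omega) (by omega)
        omega
    · rw [pvLn, if_neg h] at h1 ⊢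
      have : k = m + 1 := by omega
      subst this
      rw [pvLn, if_neg h]
      omega

theorem pvLn_ge (xs : List Int) (m k : Nat)
    (hall : ∀ i, k ≤ i → i < m → xs[i]? = some 1) (hk : k ≤ m) : m - k ≤ pvLn xs m := by
  induction m with
  | zero => omega
  | succ m ih =>
    rcases Nat.eq_or_lt_of_le hk with rfl | hlt
    · omega
    · have hm : xs[m]? = some 1 := hall m (by omega) (by omega)
      rw [pvLn, if_pos hm]
      have := ih (fun i hi1 hi2 => hall i hi1 (by omega)) (by omega)
      omega

-- the value of B's `ans` after processing the first m elements (p valid, P = p.toNat)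
def pvAnsSpec (xs : List Int) (P m : Nat) : Int :=
  if xs[P]? = some 1 ∧ P + 1 + pvRn xs (P + 1) < m then
    ((1 + pvLn xs P + pvRn xs (P + 1) : Nat) : Int)
  else 0

theorem pvFold_inv (xs : List Int) (p : Int) (hp0 : 0 ≤ p) (_hpn : p < (xs.length : Int))
    (m : Nat) (hm : m ≤ xs.length) :
    ((PySem.List.enumerate xs 0).take m).foldl (pvBStep p) (0, 0, 0) =
      ((m : Int) - pvLn xs m, (pvLn xs m : Int), pvAnsSpec xs p.toNat m) := by
  induction m with
  | zero => simp [pvLn, pvAnsSpec]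
  | succ m ih =>
    have hmn : m < xs.length := by omega
    have hsome : xs[m]? = some xs[m] := List.getElem?_eq_getElem hmn
    rw [List.take_add_one, List.foldl_append, ih (by omega)]
    have he : (PySem.List.enumerate xs 0)[m]? = some ((m : Int), xs[m]) := by
      rw [PySem.List.getElem?_enumerate, hsome]
      simp
    rw [he]
    simp only [Option.toList_some, List.foldl_cons, List.foldl_nil, pvBStep]
    have hPp : (p.toNat : Int) = p := Int.toNat_of_nonneg hp0
    have hLle := pvLn_le xs m
    by_cases h1 : xs[m] = 1
    · have hm1 : xs[m]? = some 1 := by rw [hsome, h1]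
      rw [if_pos h1]
      have hans : pvAnsSpec xs p.toNat (m + 1) = pvAnsSpec xs p.toNat m := by
        unfold pvAnsSpec
        by_cases hq : xs[p.toNat]? = some 1
        · have hne : p.toNat + 1 + pvRn xs (p.toNat + 1) ≠ m := by
            intro hEq
            have hend := pvRn_end_ne xs (p.toNat + 1)
            rw [show (p.toNat + 1) + pvRn xs (p.toNat + 1) = m from by omega] at hend
            exact hend hm1
          simp only [hq, true_and]
          have hiff : (p.toNat + 1 + pvRn xs (p.toNat + 1) < m + 1) ↔
              (p.toNat + 1 + pvRn xs (p.toNat + 1) < m) := by omega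
          simp only [hiff]
        · simp [hq]
      rw [hans, pvLn, if_pos hm1]
      refine Prod.ext ?_ (Prod.ext ?_ rfl)
      · push_cast; ring
      · push_cast; ring
    · have hm1 : ¬ xs[m]? = some 1 := by
        rw [hsome]
        intro hc
        exact h1 (Option.some.inj hc)
      rw [if_neg h1, pvLn, if_neg hm1]
      by_cases hcov : (m : Int) - (pvLn xs m : Int) ≤ p ∧ p < (m : Int) - (pvLn xs m : Int) + (pvLn xs m : Int)
      · rw [if_pos hcov]
        have hPlo : m - pvLn xs m ≤ p.toNat := by omega
        have hPhi : p.toNat < m := by omega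
        have hq : xs[p.toNat]? = some 1 := pvLn_all_one xs m p.toNat hPlo hPhi
        have hRn : pvRn xs (p.toNat + 1) = m - (p.toNat + 1) :=
          pvRn_of_all xs (p.toNat + 1) m
            (fun i hi1 hi2 => pvLn_all_one xs m i (by omega) hi2) hm1 (by omega)
        have hLnP : pvLn xs p.toNat + (m - p.toNat) = pvLn xs m :=
          pvLn_sub xs m p.toNat hPlo (by omega)
        refine Prod.ext ?_ (Prod.ext rfl ?_)
        · push_cast; ring
        · rw [pvAnsSpec, if_pos ⟨hq, by omega⟩]
          push_cast
          omega
      · rw [if_neg hcov]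
        have hans : pvAnsSpec xs p.toNat (m + 1) = pvAnsSpec xs p.toNat m := by
          unfold pvAnsSpec
          by_cases hq : xs[p.toNat]? = some 1
          · have hne : p.toNat + 1 + pvRn xs (p.toNat + 1) ≠ m := by
              intro hEq
              have hall : ∀ i, p.toNat ≤ i → i < m → xs[i]? = some 1 := by
                intro i hi1 hi2
                rcases Nat.eq_or_lt_of_le hi1 with rfl | hlt
                · exact hq
                · exact pvRn_all_one xs (p.toNat + 1) i hlt (by omega)
              have hge := pvLn_ge xs m p.toNat hall (by omega)
              exact hcov ⟨by omega, by omega⟩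
            simp only [hq, true_and]
            have hiff : (p.toNat + 1 + pvRn xs (p.toNat + 1) < m + 1) ↔
                (p.toNat + 1 + pvRn xs (p.toNat + 1) < m) := by omega
            simp only [hiff]
          · simp [hq]
        rw [hans]
        refine Prod.ext ?_ (Prod.ext rfl rfl)
        push_cast; ring

-- ===== VERDICT (by name: the statement is the Claim_ definition above) =====
theorem group_of_no_1_spec : Claim_equal_group_of_no_1 := by
  intro xs p _
  unfold Spec_group_of_no_1 group_of_no_1 group_of_no_1_alt
  by_cases hrange : p < 0 ∨ (xs.length : Int) ≤ p
  · rw [if_pos hrange, if_pos hrange]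
  · rw [if_neg hrange, if_neg hrange]
    rw [not_or, not_lt, not_le] at hrange
    obtain ⟨hp0, hpn⟩ := hrange
    have hPp : (p.toNat : Int) = p := Int.toNat_of_nonneg hp0
    have hPn : p.toNat < xs.length := by omega
    have hLle := pvLn_le xs xs.length
    have hfold := pvFold_inv xs p hp0 hpn xs.length le_rfl
    rw [show ((PySem.List.enumerate xs 0).take xs.length) = PySem.List.enumerate xs 0 from by
      rw [← PySem.List.length_enumerate (s := 0) (xs := xs)]
      exact List.take_length] at hfold
    rw [hfold]
    simp only []
    have hget : PySem.List.pyGet? xs p = xs[p.toNat]? := by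
      rw [← hPp, PySem.List.pyGet?_natCast]
      congr 1
    have hnN : ¬ xs[xs.length]? = some 1 := by simp
    by_cases hq : xs[p.toNat]? = some 1
    · rw [if_neg (by rw [hget, hq]; simp)]
      rw [show p - 1 = (p.toNat : Int) - 1 from by omega, pvALeft_eq]
      rw [show p + 1 = ((p.toNat + 1 : Nat) : Int) from by push_cast; omega, pvARight_eq]
      by_cases hcov : (xs.length : Int) - (pvLn xs xs.length : Int) ≤ p ∧
          p < (xs.length : Int) - (pvLn xs xs.length : Int) + (pvLn xs xs.length : Int)
      · rw [if_pos hcov]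
        have hRn : pvRn xs (p.toNat + 1) = xs.length - (p.toNat + 1) :=
          pvRn_of_all xs (p.toNat + 1) xs.length
            (fun i hi1 hi2 => pvLn_all_one xs xs.length i (by omega) hi2) hnN (by omega)
        have hLnP : pvLn xs p.toNat + (xs.length - p.toNat) = pvLn xs xs.length :=
          pvLn_sub xs xs.length p.toNat (by omega) (by omega)
        omega
      · rw [if_neg hcov]
        have hle := pvRn_add_le xs (p.toNat + 1) (by omega)
        have hne : p.toNat + 1 + pvRn xs (p.toNat + 1) ≠ xs.length := by
          intro hEq
          have hall : ∀ i, p.toNat ≤ i → i < xs.length → xs[i]? = some 1 := by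
            intro i hi1 hi2
            rcases Nat.eq_or_lt_of_le hi1 with rfl | hlt
            · exact hq
            · exact pvRn_all_one xs (p.toNat + 1) i hlt (by omega)
          have hge := pvLn_ge xs xs.length p.toNat hall (by omega)
          exact hcov ⟨by omega, by omega⟩
        rw [pvAnsSpec, if_pos ⟨hq, by omega⟩]
        push_cast
        ring
    · rw [if_pos (by rw [hget]; simpa using hq)]
      have hcov : ¬ ((xs.length : Int) - (pvLn xs xs.length : Int) ≤ p ∧
          p < (xs.length : Int) - (pvLn xs xs.length : Int) + (pvLn xs xs.length : Int)) := by
        rintro ⟨c1, c2⟩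
        exact hq (pvLn_all_one xs xs.length p.toNat (by omega) (by omega))
      rw [if_neg hcov, pvAnsSpec, if_neg (by rintro ⟨h1, -⟩; exact hq h1)]
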